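-- pv_equiv track=rewrite | github.com/SamueleAlpino/Python_exercise | program02.py | es2
-- ===== SOURCE A (Python) =====
-- def es2(N, ins):
--
--     buttons = []
--     light_on = list(ins.copy())
--
--     #tutte le luci accese
--     if len(ins) == N:
--         return buttons
--
--     start_index = N
--     #se solo una lampadina è spenta
--     if N - len(ins) == 1:
--         for i in range (1,N):
--             if not i in light_on:
--                 start_index = i
--                 break
--
--     #per ogni lampadina e i suoi divisori controllo se sono accesi:
--     for lampadina_index in range(start_index,0,-1):
--
--         if not lampadina_index in light_on:
--             buttons.append(lampadina_index)
--             #controlla se i divisori sono accesi o spenti e agisci di conseguenza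
--             for i in range(1, lampadina_index):
--                 if lampadina_index % i == 0:
--                     #se è acceso spegni e viceversa
--                     if i in light_on:
--                         light_on.remove(i)
--                     else:
--                         light_on.append(i)
--
--     buttons.sort()
--     return buttons
-- ===== SOURCE B (Python) =====
-- def es2(N, ins):
--     # counter of lamp values (handles duplicates exactly like A's list remove/append)
--     cnt = {}
--     for v in ins:
--         cnt[v] = cnt.get(v, 0) + 1
--
--     if len(ins) == N:
--         return []
--
--     start_index = N
--     if N - len(ins) == 1:
--         for i in range(1, N):
--             if cnt.get(i, 0) == 0:
--                 start_index = i
--                 break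
--
--     def toggle(i):
--         c = cnt.get(i, 0)
--         cnt[i] = c - 1 if c > 0 else c + 1
--
--     buttons = []
--     for k in range(start_index, 0, -1):
--         if cnt.get(k, 0) == 0:
--             buttons.append(k)
--             # toggle every proper divisor of k, enumerated in O(sqrt k) pairs
--             d = 1
--             while d * d <= k:
--                 if k % d == 0:
--                     if d != k:
--                         toggle(d)
--                     q = k // d
--                     if q != k and q != d:
--                         toggle(q)
--                 d += 1
--     buttons.reverse()
--     return buttons
-- ===== Notes on version B (the rewrite author's own statement) =====
-- stated objective: faster
-- what changed: B replaces A's list-with-remove/append light bookkeeping by a count dictionary (O(1) membership/toggle instead of O(n) list scans) and enumerates each pressed lamp's divisors in O(sqrt k) complementary pairs instead of scanning all of 1..k-1.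
import Mathlib
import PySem

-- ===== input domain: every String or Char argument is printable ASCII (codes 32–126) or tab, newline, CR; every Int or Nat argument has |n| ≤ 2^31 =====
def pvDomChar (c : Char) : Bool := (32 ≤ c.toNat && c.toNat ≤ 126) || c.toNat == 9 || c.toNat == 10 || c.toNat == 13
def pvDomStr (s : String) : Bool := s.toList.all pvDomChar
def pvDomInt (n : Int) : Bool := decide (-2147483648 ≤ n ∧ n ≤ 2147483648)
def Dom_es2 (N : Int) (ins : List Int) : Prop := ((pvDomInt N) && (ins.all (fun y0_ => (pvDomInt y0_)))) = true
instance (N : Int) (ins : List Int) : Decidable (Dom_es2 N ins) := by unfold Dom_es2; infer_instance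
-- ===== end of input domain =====

-- B replaces A's list with remove/append bookkeeping by a count dictionary and
-- enumerates each pressed lamp's divisors in O(sqrt k) pairs instead of scanning 1..k-1.

-- ===== PORT A =====
-- inner body of A's divisor loop: 'if i in light_on: light_on.remove(i) else: light_on.append(i)'
def es2Toggle (light : List Int) (i : Int) : List Int :=
  if light.contains i then (PySem.List.remove? light i).getD light else light ++ [i]

-- A's 'for i in range(1, lampadina_index): if lampadina_index % i == 0: …'
def es2Step (k : Int) (light : List Int) : List Int :=
  (PySem.List.pyRange 1 k 1).foldl
    (fun l i => if PySem.Int.mod k i = 0 then es2Toggle l i else l) light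

def es2 (N : Int) (ins : List Int) : List Int :=
  let light_on := ins
  if (ins.length : Int) = N then []
  else
    let start_index :=
      if N - (ins.length : Int) = 1 then
        match (PySem.List.pyRange 1 N 1).find? (fun i => !light_on.contains i) with
        | some i => i
        | none => N
      else N
    let r := (PySem.List.pyRange start_index 0 (-1)).foldl
      (fun (st : List Int × List Int) k =>
        if st.2.contains k then st
        else (st.1 ++ [k], es2Step k st.2))
      ([], light_on)
    PySem.List.sorted r.1 (fun x => x) false

-- ===== PORT B =====
-- B's toggle: cnt[i] = c - 1 if c > 0 else c + 1
def es2AltToggle (c : PySem.Dict Int Int) (i : Int) : PySem.Dict Int Int :=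
  let v := c.getD i 0
  c.insert i (if 0 < v then v - 1 else v + 1)

-- B's 'd = 1; while d*d <= k: …; d += 1' (fuel = k.toNat + 1 bounds the iterations exactly)
def es2AltDivs (k : Int) : Nat → Int → PySem.Dict Int Int → PySem.Dict Int Int
  | 0, _, c => c
  | fuel + 1, d, c =>
    if d * d ≤ k then
      let c1 :=
        if PySem.Int.mod k d = 0 then
          let c' := if d ≠ k then es2AltToggle c d else c
          let q := PySem.Int.floordiv k d
          if q ≠ k ∧ q ≠ d then es2AltToggle c' q else c'
        else c
      es2AltDivs k fuel (d + 1) c1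
    else c

def es2_alt (N : Int) (ins : List Int) : List Int :=
  let cnt := ins.foldl (fun d v => d.insert v (d.getD v 0 + 1)) (PySem.Dict.empty : PySem.Dict Int Int)
  if (ins.length : Int) = N then []
  else
    let start_index :=
      if N - (ins.length : Int) = 1 then
        match (PySem.List.pyRange 1 N 1).find? (fun i => cnt.getD i 0 == 0) with
        | some i => i
        | none => N
      else N
    let r := (PySem.List.pyRange start_index 0 (-1)).foldl
      (fun (st : List Int × PySem.Dict Int Int) k =>
        if st.2.getD k 0 == 0 then (st.1 ++ [k], es2AltDivs k (k.toNat + 1) 1 st.2)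
        else st)
      ([], cnt)
    r.1.reverse

-- ===== PRECONDITION & SPEC =====
def Spec_es2 (N : Int) (ins : List Int) (out : List Int) : Prop := out = es2_alt N ins
instance (N : Int) (ins : List Int) (out : List Int) : Decidable (Spec_es2 N ins out) := by
  unfold Spec_es2; infer_instance

-- ===== CLAIM (what is proved, stated in full; the proofs are below) =====
def Claim_equal_es2 : Prop := ∀ (N : Int) (ins : List Int), Dom_es2 N ins → Spec_es2 N ins (es2 N ins)

-- ===== LEMMAS AND PROOFS =====

-- the common toggle on a lamp's count
def tI (v : Int) : Int := if 0 < v then v - 1 else v + 1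

-- the multiset relation between A's light_on list and B's count dictionary
def CRel (l : List Int) (c : PySem.Dict Int Int) : Prop :=
  ∀ x : Int, (l.count x : Int) = c.getD x 0

theorem CRel_init (ins : List Int) :
    CRel ins (ins.foldl (fun d v => d.insert v (d.getD v 0 + 1)) PySem.Dict.empty) := by
  intro x
  rw [PySem.Dict.getD_foldl_insert_add_one]
  simp [PySem.Dict.getD_empty]

-- A's toggle effect on counts
theorem count_es2Toggle (l : List Int) (i x : Int) :
    ((es2Toggle l i).count x : Int) = if x = i then tI (l.count x : Int) else (l.count x : Int) := by
  unfold es2Toggle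
  by_cases hm : i ∈ l
  · have h1 : l.contains i = true := by simpa using hm
    rw [h1, if_pos rfl, PySem.List.remove?_eq_some_erase l i hm, Option.getD_some]
    by_cases hx : x = i
    · subst hx
      have hpos : 0 < l.count x := List.count_pos_iff.2 hm
      rw [if_pos rfl, List.count_erase_self]
      unfold tI
      rw [if_pos (by exact_mod_cast hpos)]
      omega
    · rw [if_neg hx, List.count_erase_of_ne hx]
  · have h1 : l.contains i = false := by simpa using hm
    rw [h1]
    simp only [Bool.false_eq_true, if_false, List.count_append]
    by_cases hx : x = i
    · subst hx
      have h0 : l.count x = 0 := List.count_eq_zero.2 hm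
      unfold tI
      simp [h0]
    · simp [hx, Ne.symm hx]

-- A's inner divisor loop, per-key effect (any list visiting each element at most once)
theorem count_foldA (k : Int) (L : List Int) (hL : L.Nodup) :
    ∀ (l : List Int) (x : Int),
      (((L.foldl (fun l i => if PySem.Int.mod k i = 0 then es2Toggle l i else l) l).count x : Int))
        = if x ∈ L ∧ PySem.Int.mod k x = 0 then tI (l.count x : Int) else (l.count x : Int) := by
  induction L with
  | nil => intro l x; simp
  | cons i L ih =>
    intro l x
    have hiL : i ∉ L := (List.nodup_cons.mp hL).1
    have ih' := ih (List.nodup_cons.mp hL).2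
    simp only [List.foldl_cons]
    rw [ih']
    by_cases hx : x = i
    · subst hx
      by_cases hm : PySem.Int.mod k x = 0
      · simp [hiL, hm, count_es2Toggle]
      · simp [hiL, hm]
    · have hcnt : (((if PySem.Int.mod k i = 0 then es2Toggle l i else l).count x : Nat) : Int)
          = (l.count x : Int) := by
        by_cases hm : PySem.Int.mod k i = 0
        · simp [hm, count_es2Toggle, hx]
        · simp [hm]
      rw [hcnt]
      simp [hx]

theorem count_es2Step (k : Int) (l : List Int) (x : Int) :
    ((es2Step k l).count x : Int)
      = if 1 ≤ x ∧ x < k ∧ x ∣ k then tI (l.count x : Int) else (l.count x : Int) := by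
  unfold es2Step
  rw [count_foldA k _ (PySem.List.nodup_pyRange_one 1 k) l x]
  simp only [PySem.List.mem_pyRange_one, PySem.Int.mod_eq_zero_iff_dvd, and_assoc]

-- B's toggle effect
theorem getD_es2AltToggle (c : PySem.Dict Int Int) (i x : Int) :
    (es2AltToggle c i).getD x 0 = if x = i then tI (c.getD i 0) else c.getD x 0 := by
  unfold es2AltToggle tI
  rw [PySem.Dict.getD_insert]

-- which keys one iteration of B's while loop toggles
def hitAt (k d x : Int) : Bool :=
  (PySem.Int.mod k d == 0) &&
    ((x == d && d != k) || (x == PySem.Int.floordiv k d && x != k && x != d))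

def hit (k d : Int) (fuel : Nat) (x : Int) : Bool :=
  (PySem.List.pyRange d (d + fuel) 1).any (fun e => decide (e * e ≤ k) && hitAt k e x)

theorem hitAt_iff (k d x : Int) :
    hitAt k d x = true ↔
      (PySem.Int.mod k d = 0 ∧
        ((x = d ∧ d ≠ k) ∨ (x = PySem.Int.floordiv k d ∧ x ≠ k ∧ x ≠ d))) := by
  simp [hitAt, and_assoc]

theorem hit_iff_exists (k d : Int) (fuel : Nat) (x : Int) :
    hit k d fuel x = true ↔ ∃ e : Int, d ≤ e ∧ e < d + fuel ∧ e * e ≤ k ∧ hitAt k e x = true := by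
  unfold hit
  simp only [List.any_eq_true, PySem.List.mem_pyRange_one, Bool.and_eq_true, decide_eq_true_eq]
  constructor
  · rintro ⟨e, ⟨h1, h2⟩, h3, h4⟩; exact ⟨e, h1, h2, h3, h4⟩
  · rintro ⟨e, h1, h2, h3, h4⟩; exact ⟨e, ⟨h1, h2⟩, h3, h4⟩

theorem hitAt_unique (k d e x : Int) (hk : 1 ≤ k) (hd : 1 ≤ d) (he : 1 ≤ e)
    (hne : d ≠ e) (hdk : d * d ≤ k) (hek : e * e ≤ k)
    (h1 : hitAt k d x = true) (h2 : hitAt k e x = true) : False := by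
  rw [hitAt_iff] at h1 h2
  obtain ⟨hm1, hc1⟩ := h1
  obtain ⟨hm2, hc2⟩ := h2
  have hdvd1 : d ∣ k := (PySem.Int.mod_eq_zero_iff_dvd k d).1 hm1
  have hdvd2 : e ∣ k := (PySem.Int.mod_eq_zero_iff_dvd k e).1 hm2
  have hf1 : PySem.Int.floordiv k d = k / d := PySem.Int.floordiv_eq_ediv_of_pos (by omega)
  have hf2 : PySem.Int.floordiv k e = k / e := PySem.Int.floordiv_eq_ediv_of_pos (by omega)
  have hq1 : k / d * d = k := Int.ediv_mul_cancel hdvd1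
  have hq2 : k / e * e = k := Int.ediv_mul_cancel hdvd2
  rcases hc1 with ⟨hx1, _⟩ | ⟨hx1, _, hxd1⟩ <;> rcases hc2 with ⟨hx2, _⟩ | ⟨hx2, _, hxd2⟩
  · exact hne (hx1 ▸ hx2 ▸ rfl)
  · -- x = d and x = k / e
    rw [hf2] at hx2
    have hke : k = e * d := by nlinarith [hq2, hx1, hx2]
    have h5 : d ≤ e := by nlinarith [hdk]
    have h6 : e ≤ d := by nlinarith [hek]
    omega
  · -- x = k / d and x = e
    rw [hf1] at hx1
    have hke : k = d * e := by nlinarith [hq1, hx1, hx2]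
    have h5 : d ≤ e := by nlinarith [hdk]
    have h6 : e ≤ d := by nlinarith [hek]
    omega
  · -- x = k / d = k / e
    rw [hf1] at hx1; rw [hf2] at hx2
    have hx0 : 1 ≤ x := by nlinarith [hq1, hq2]
    have : x * d = x * e := by nlinarith [hq1, hq2]
    have : d = e := by
      have hx0' : x ≠ 0 := by omega
      exact mul_left_cancel₀ hx0' this
    exact hne this

theorem getD_c1 (k d : Int) (c : PySem.Dict Int Int) (x : Int) :
    (PySem.Dict.getD
      (if PySem.Int.mod k d = 0 then
        (if PySem.Int.floordiv k d ≠ k ∧ PySem.Int.floordiv k d ≠ d then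
          es2AltToggle (if d ≠ k then es2AltToggle c d else c) (PySem.Int.floordiv k d)
        else (if d ≠ k then es2AltToggle c d else c))
      else c) x 0)
      = if hitAt k d x then tI (c.getD x 0) else c.getD x 0 := by
  by_cases hm : PySem.Int.mod k d = 0
  · rw [if_pos hm]
    by_cases h1 : PySem.Int.floordiv k d ≠ k ∧ PySem.Int.floordiv k d ≠ d
    · rw [if_pos h1, getD_es2AltToggle]
      by_cases hxq : x = PySem.Int.floordiv k d
      · have hx : hitAt k d x = true :=
          (hitAt_iff k d x).2 ⟨hm, Or.inr ⟨hxq, hxq ▸ h1.1, hxq ▸ h1.2⟩⟩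
        rw [if_pos hxq, hx, if_pos rfl]
        have hqd : PySem.Int.floordiv k d ≠ d := h1.2
        by_cases hdk : d ≠ k
        · rw [if_pos hdk, getD_es2AltToggle, if_neg hqd, hxq]
        · rw [if_neg hdk, hxq]
      · rw [if_neg hxq]
        by_cases hdk : d ≠ k
        · rw [if_pos hdk, getD_es2AltToggle]
          by_cases hxd : x = d
          · have hx : hitAt k d x = true :=
              (hitAt_iff k d x).2 ⟨hm, Or.inl ⟨hxd, hdk⟩⟩
            rw [if_pos hxd, hx, if_pos rfl, hxd]
          · have hx : hitAt k d x = false := by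
              rw [Bool.eq_false_iff]
              intro hcon
              rcases ((hitAt_iff k d x).1 hcon).2 with ⟨h, _⟩ | ⟨h, _⟩
              · exact hxd h
              · exact hxq h
            rw [if_neg hxd, hx, if_neg (by simp)]
        · have hx : hitAt k d x = false := by
            rw [Bool.eq_false_iff]
            intro hcon
            rcases ((hitAt_iff k d x).1 hcon).2 with ⟨_, h⟩ | ⟨h, _⟩
            · exact hdk h
            · exact hxq h
          rw [if_neg hdk, hx, if_neg (by simp)]
    · rw [if_neg h1]
      by_cases hdk : d ≠ k
      · rw [if_pos hdk, getD_es2AltToggle]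
        by_cases hxd : x = d
        · have hx : hitAt k d x = true :=
            (hitAt_iff k d x).2 ⟨hm, Or.inl ⟨hxd, hdk⟩⟩
          rw [if_pos hxd, hx, if_pos rfl, hxd]
        · have hx : hitAt k d x = false := by
            rw [Bool.eq_false_iff]
            intro hcon
            rcases ((hitAt_iff k d x).1 hcon).2 with ⟨h, _⟩ | ⟨h, hk2, hd2⟩
            · exact hxd h
            · exact h1 ⟨h ▸ hk2, h ▸ hd2⟩
          rw [if_neg hxd, hx, if_neg (by simp)]
      · have hx : hitAt k d x = false := by
          rw [Bool.eq_false_iff]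
          intro hcon
          rcases ((hitAt_iff k d x).1 hcon).2 with ⟨_, h⟩ | ⟨h, hk2, hd2⟩
          · exact hdk h
          · exact h1 ⟨h ▸ hk2, h ▸ hd2⟩
        rw [if_neg hdk, hx, if_neg (by simp)]
  · have hx : hitAt k d x = false := by
      rw [Bool.eq_false_iff]
      intro hcon
      exact hm ((hitAt_iff k d x).1 hcon).1
    rw [if_neg hm, hx, if_neg (by simp)]

theorem getD_es2AltDivs (k : Int) (hk : 1 ≤ k) :
    ∀ (fuel : Nat) (d : Int), 1 ≤ d → ∀ (c : PySem.Dict Int Int) (x : Int),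
      (es2AltDivs k fuel d c).getD x 0
        = if hit k d fuel x then tI (c.getD x 0) else c.getD x 0 := by
  intro fuel
  induction fuel with
  | zero =>
    intro d hd c x
    have : hit k d 0 x = false := by
      rw [Bool.eq_false_iff]
      intro hcon
      obtain ⟨e, h1, h2, _, _⟩ := (hit_iff_exists k d 0 x).1 hcon
      omega
    rw [this]
    simp [es2AltDivs]
  | succ fuel ih =>
    intro d hd c x
    rw [es2AltDivs]
    by_cases hdd : d * d ≤ k
    · rw [if_pos hdd]
      simp only []
      rw [ih (d + 1) (by omega) _ x, getD_c1]
      have hsplit : hit k d (fuel + 1) x = true ↔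
          hitAt k d x = true ∨ hit k (d + 1) fuel x = true := by
        rw [hit_iff_exists, hit_iff_exists]
        constructor
        · rintro ⟨e, h1, h2, h3, h4⟩
          by_cases he : e = d
          · exact Or.inl (he ▸ h4)
          · exact Or.inr ⟨e, by omega, by omega, h3, h4⟩
        · rintro (h | ⟨e, h1, h2, h3, h4⟩)
          · exact ⟨d, le_refl d, by omega, hdd, h⟩
          · exact ⟨e, by omega, by omega, h3, h4⟩
      have hdisj : ¬(hitAt k d x = true ∧ hit k (d + 1) fuel x = true) := by
        rintro ⟨hA, hB⟩
        obtain ⟨e, h1, h2, h3, h4⟩ := (hit_iff_exists k (d + 1) fuel x).1 hB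
        exact hitAt_unique k d e x hk hd (by omega) (by omega) hdd h3 hA h4
      by_cases hA : hitAt k d x = true
      · have hB : hit k (d + 1) fuel x = false := by
          rw [Bool.eq_false_iff]; intro h; exact hdisj ⟨hA, h⟩
        rw [hA, hB, if_pos rfl, if_neg (by simp), if_pos (hsplit.2 (Or.inl hA))]
      · have hA' : hitAt k d x = false := Bool.eq_false_iff.mpr hA
        rw [hA']
        simp only [Bool.false_eq_true, if_false]
        by_cases hB : hit k (d + 1) fuel x = true
        · rw [hB, if_pos rfl, if_pos (hsplit.2 (Or.inr hB))]
        · have hB' : hit k (d + 1) fuel x = false := Bool.eq_false_iff.mpr hB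
          have hT : hit k d (fuel + 1) x = false := by
            rw [Bool.eq_false_iff]
            intro h
            rcases hsplit.1 h with h | h
            · exact hA h
            · exact hB h
          rw [hB', hT]
    · rw [if_neg hdd]
      have hT : hit k d (fuel + 1) x = false := by
        rw [Bool.eq_false_iff]
        intro h
        obtain ⟨e, h1, _, h3, _⟩ := (hit_iff_exists k d (fuel + 1) x).1 h
        nlinarith
      rw [hT]
      simp

theorem hit_iff (k x : Int) (hk : 1 ≤ k) :
    hit k 1 (k.toNat + 1) x = true ↔ 1 ≤ x ∧ x < k ∧ x ∣ k := by
  have hcast : ((k.toNat : Int)) = k := Int.toNat_of_nonneg (by omega)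
  rw [hit_iff_exists]
  constructor
  · rintro ⟨e, he1, _, he3, h4⟩
    rw [hitAt_iff] at h4
    obtain ⟨hm, hc⟩ := h4
    have hdvd : e ∣ k := (PySem.Int.mod_eq_zero_iff_dvd k e).1 hm
    rcases hc with ⟨hx, hek⟩ | ⟨hx, hxk, _⟩
    · subst hx
      refine ⟨he1, ?_, hdvd⟩
      have : x ≤ k := by nlinarith
      omega
    · have hf : PySem.Int.floordiv k e = k / e := PySem.Int.floordiv_eq_ediv_of_pos (by omega)
      rw [hf] at hx
      have hq : k / e * e = k := Int.ediv_mul_cancel hdvd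
      subst hx
      have hx1 : 1 ≤ k / e := by nlinarith
      refine ⟨hx1, ?_, ⟨e, by linarith [hq]⟩⟩
      have : k / e ≤ k := by nlinarith
      omega
  · rintro ⟨hx1, hx2, hx3⟩
    obtain ⟨cc, hcc⟩ := hx3
    have hcc1 : 1 ≤ cc := by nlinarith
    by_cases hxx : x * x ≤ k
    · refine ⟨x, hx1, by push_cast; rw [hcast]; omega, hxx, ?_⟩
      rw [hitAt_iff]
      exact ⟨(PySem.Int.mod_eq_zero_iff_dvd k x).2 ⟨cc, hcc⟩, Or.inl ⟨rfl, by omega⟩⟩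
    · have hclt : cc < x := by nlinarith
      have hcck : cc ≤ k := by nlinarith
      refine ⟨cc, hcc1, by push_cast; rw [hcast]; omega, by nlinarith, ?_⟩
      rw [hitAt_iff]
      have hf : PySem.Int.floordiv k cc = k / cc := PySem.Int.floordiv_eq_ediv_of_pos (by omega)
      have : k / cc = x := by
        rw [hcc]
        exact Int.mul_ediv_cancel x (by omega)
      exact ⟨(PySem.Int.mod_eq_zero_iff_dvd k cc).2 ⟨x, by rw [hcc]; ring⟩,
        Or.inr ⟨by rw [hf, this], by omega, by omega⟩⟩

theorem CRel_step (k : Int) (hk : 1 ≤ k) (l : List Int) (c : PySem.Dict Int Int) (h : CRel l c) :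
    CRel (es2Step k l) (es2AltDivs k (k.toNat + 1) 1 c) := by
  intro x
  rw [count_es2Step, getD_es2AltDivs k hk _ _ (by omega) c x, h x]
  by_cases hcond : 1 ≤ x ∧ x < k ∧ x ∣ k
  · rw [if_pos hcond, if_pos ((hit_iff k x hk).2 hcond)]
  · rw [if_neg hcond]
    have : hit k 1 (k.toNat + 1) x = false := by
      rw [Bool.eq_false_iff]
      intro hcon
      exact hcond ((hit_iff k x hk).1 hcon)
    rw [this, if_neg (by simp)]

-- the main descending loop
theorem main_fold :
    ∀ (L : List Int), (∀ k ∈ L, 1 ≤ k) →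
    ∀ (acc : List Int) (l : List Int) (c : PySem.Dict Int Int), CRel l c →
      (L.foldl (fun (st : List Int × List Int) k =>
          if st.2.contains k then st else (st.1 ++ [k], es2Step k st.2)) (acc, l)).1
        = (L.foldl (fun (st : List Int × PySem.Dict Int Int) k =>
          if st.2.getD k 0 == 0 then (st.1 ++ [k], es2AltDivs k (k.toNat + 1) 1 st.2) else st)
          (acc, c)).1
      ∧ ∃ ex : List Int,
          (L.foldl (fun (st : List Int × List Int) k =>
            if st.2.contains k then st else (st.1 ++ [k], es2Step k st.2)) (acc, l)).1
            = acc ++ ex ∧ ex.Sublist L := by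
  intro L
  induction L with
  | nil =>
    intro _ acc l c _
    exact ⟨rfl, [], by simp, List.Sublist.refl _⟩
  | cons k L ih =>
    intro hL acc l c hrel
    have hk : 1 ≤ k := hL k (by simp)
    have hL' : ∀ k' ∈ L, 1 ≤ k' := fun k' hk' => hL k' (by simp [hk'])
    simp only [List.foldl_cons]
    by_cases hc : c.getD k 0 = 0
    · have hA : l.contains k = false := by
        have : (l.count k : Int) = 0 := by rw [hrel k, hc]
        have : k ∉ l := by
          intro hmem
          have := List.count_pos_iff.2 hmem
          omega
        simpa using this
      have hB : (c.getD k 0 == 0) = true := by simpa using hc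
      rw [hA, hB]
      simp only [Bool.false_eq_true, if_false, if_true]
      obtain ⟨h1, ex, h2, h3⟩ := ih hL' (acc ++ [k]) _ _ (CRel_step k hk l c hrel)
      refine ⟨h1, k :: ex, ?_, List.Sublist.cons₂ k h3⟩
      rw [h2, List.append_assoc]
      rfl
    · have hA : l.contains k = true := by
        have hpos : 0 < l.count k := by
          have := hrel k
          omega
        simpa using List.count_pos_iff.1 hpos
      have hB : (c.getD k 0 == 0) = false := by simpa using hc
      rw [hA, hB]
      simp only [Bool.false_eq_true, if_false, if_true]
      obtain ⟨h1, ex, h2, h3⟩ := ih hL' acc l c hrel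
      exact ⟨h1, ex, h2, List.Sublist.cons k h3⟩

-- ===== VERDICT (by name: the statement is the Claim_ definition above) =====
theorem es2_spec : Claim_equal_es2 := by
  intro N ins _
  unfold Spec_es2
  simp only [es2, es2_alt]
  have hrel := CRel_init ins
  by_cases hlen : (ins.length : Int) = N
  · rw [if_pos hlen, if_pos hlen]
  · rw [if_neg hlen, if_neg hlen]
    have hpred : (fun i => (ins.foldl (fun d v => d.insert v (d.getD v 0 + 1))
        (PySem.Dict.empty : PySem.Dict Int Int)).getD i 0 == 0) = (fun i => !ins.contains i) := by
      funext i
      by_cases hm : i ∈ ins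
      · have h2 : ¬ (ins.foldl (fun d v => d.insert v (d.getD v 0 + 1))
            (PySem.Dict.empty : PySem.Dict Int Int)).getD i 0 = 0 := by
          rw [← hrel i]
          have := List.count_pos_iff.2 hm
          omega
        simp [hm, h2]
      · have h2 : (ins.foldl (fun d v => d.insert v (d.getD v 0 + 1))
            (PySem.Dict.empty : PySem.Dict Int Int)).getD i 0 = 0 := by
          rw [← hrel i, List.count_eq_zero.2 hm]
          rfl
        simp [hm, h2]
    rw [hpred]
    set S : Int := (if N - (ins.length : Int) = 1 then
        match (PySem.List.pyRange 1 N 1).find? (fun i => !ins.contains i) with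
        | some i => i
        | none => N
      else N) with hS
    have hmem : ∀ k ∈ PySem.List.pyRange S 0 (-1), 1 ≤ k := fun k hk0 => by
      have := PySem.List.mem_pyRange_neg_one.1 hk0
      omega
    obtain ⟨h1, ex, h2, h3⟩ := main_fold (PySem.List.pyRange S 0 (-1)) hmem [] ins _ hrel
    rw [← h1, h2, List.nil_append]
    have hp : (PySem.List.pyRange S 0 (-1)).Pairwise (fun a b => b < a) := by
      rw [PySem.List.pyRange_neg_one_eq_reverse]
      exact List.pairwise_reverse.2 (PySem.List.pairwise_lt_pyRange_one 1 (S + 1))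
    have hpex : ex.Pairwise (fun a b => b < a) := hp.sublist h3
    have hrev : ex.reverse.Pairwise (fun a b : Int => a < b) := List.pairwise_reverse.2 hpex
    exact PySem.List.sorted_eq_of_perm_of_pairwise_lt ex ex.reverse (fun x => x)
      ex.reverse_perm hrev
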